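-- pv_equiv track=rewrite | github.com/niannianya1/InterActRNA | InterActRNA/data_processing/utils.py | parse_rna_motifs_simple
-- ===== SOURCE A (Python) =====
-- def parse_rna_motifs_simple(dot_bracket_string):
--     """
--     一个简化的RNA二级结构解析器，用于从点括号表示法中区分茎区(stem)和环区(loop)。
--
--     Args:
--         dot_bracket_string (str): RNA的二级结构，例如 "((...))".
--
--     Returns:
--         dict: 一个字典，包含两类基元的节点索引列表。
--               例如: {'stem': [0, 1, 5, 6], 'loop': [2, 3, 4]}
--               如果某类基元不存在，则对应的列表为空。
--     """
--     if not isinstance(dot_bracket_string, str) or not dot_bracket_string: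
--         return {'stem': [], 'loop': []}
--
--     n = len(dot_bracket_string)
--     stack = []
--     pairs = []
--
--     # 1. 找到所有配对的碱基
--     for i, char in enumerate(dot_bracket_string):
--         if char == '(':
--             stack.append(i)
--         elif char == ')':
--             if stack:
--                 j = stack.pop()
--                 # 存储配对 (j, i)
--                 pairs.append(tuple(sorted((i, j))))
--
--     # 2. 识别所有配对和未配对的索引
--     paired_indices = set()
--     for i, j in pairs:
--         paired_indices.add(i)
--         paired_indices.add(j)
--
--     unpaired_indices = set(range(n)) - paired_indices
--
--     return {
--         'stem': sorted(list(paired_indices)),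
--         'loop': sorted(list(unpaired_indices))
--     }
-- ===== SOURCE B (Python) =====
-- def parse_rna_motifs_simple(dot_bracket_string):
--     """Stack-free counting version: two counter passes instead of stack matching.
--     A closing bracket is paired iff the running count of unmatched opening brackets
--     before it is positive; symmetrically, an opening bracket is paired iff the
--     running count of unmatched closing brackets after it (scanning right-to-left)
--     is positive. No stack, no pair list, no sorting."""
--     n = len(dot_bracket_string)
--     matched = [False] * n
--     open_cnt = 0
--     for i, ch in enumerate(dot_bracket_string):
--         if ch == '(':
--             open_cnt += 1
--         elif ch == ')' and open_cnt > 0: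
--             open_cnt -= 1
--             matched[i] = True
--     close_cnt = 0
--     for i, ch in reversed(list(enumerate(dot_bracket_string))):
--         if ch == ')':
--             close_cnt += 1
--         elif ch == '(' and close_cnt > 0:
--             close_cnt -= 1
--             matched[i] = True
--     return {'stem': [i for i in range(n) if matched[i]],
--             'loop': [i for i in range(n) if not matched[i]]}
-- ===== Notes on version B (the rewrite author's own statement) =====
-- stated objective: alternative
-- what changed: Replaces A's stack-based matching plus pair list, index sets and two sorts with a stack-free counting method: a forward counter pass marks the matched closing brackets, a backward counter pass marks the matched opening brackets, and one ordered scan emits stem/loop; no stack, no sets, no sorting.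
import Mathlib
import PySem

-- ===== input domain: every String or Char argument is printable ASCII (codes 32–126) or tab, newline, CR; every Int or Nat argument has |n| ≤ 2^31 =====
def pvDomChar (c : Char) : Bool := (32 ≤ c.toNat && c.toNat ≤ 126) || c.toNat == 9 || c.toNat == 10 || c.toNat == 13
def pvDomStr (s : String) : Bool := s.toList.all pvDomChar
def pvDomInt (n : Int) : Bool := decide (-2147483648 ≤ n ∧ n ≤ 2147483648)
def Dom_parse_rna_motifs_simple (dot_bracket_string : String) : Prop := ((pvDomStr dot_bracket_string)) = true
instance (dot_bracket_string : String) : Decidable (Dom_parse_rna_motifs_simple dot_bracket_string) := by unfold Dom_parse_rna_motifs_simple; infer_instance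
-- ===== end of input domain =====

-- B replaces A's stack matching + pair list + index sets + two sorts with a stack-free
-- counting method (forward counter marks matched ')', backward counter marks matched '(',
-- one ordered scan emits the lists); a different algorithm of similar cost.

-- ===== PORT A =====
-- one step of A's matching loop; state = (stack, pairs)
def pvStepA (st : List Int × List (Int × Int)) (p : Int × Char) : List Int × List (Int × Int) :=
  if p.2 = '(' then (st.1 ++ [p.1], st.2)
  else if p.2 = ')' then
    match st.1.getLast? with
    | some j => (st.1.dropLast, st.2 ++ [(min p.1 j, max p.1 j)])  -- tuple(sorted((i, j))): a 2-element sort is (min, max) — exact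
    | none => st
  else st

-- 'paired_indices.add(i); paired_indices.add(j)' over the pair list
def pvBuildSet (ps : List (Int × Int)) : PySem.Set Int :=
  ps.foldl (fun s p => PySem.Set.add (PySem.Set.add s p.1) p.2) PySem.Set.empty

def parse_rna_motifs_simple (dot_bracket_string : String) : List (String × List Int) :=
  if dot_bracket_string.toList = [] then [("stem", []), ("loop", [])]
  else
    let n : Int := PySem.Str.len dot_bracket_string
    let res := (PySem.List.enumerate dot_bracket_string.toList 0).foldl pvStepA ([], [])
    let paired : PySem.Set Int := pvBuildSet res.2
    let unpaired : PySem.Set Int :=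
      PySem.Set.diff (PySem.Set.ofList (PySem.List.pyRange 0 n 1)) paired
    [("stem", PySem.List.sorted paired (fun x => x) false),
     ("loop", PySem.List.sorted unpaired (fun x => x) false)]

-- ===== PORT B =====
-- forward pass step: an opening bracket bumps the counter; a closing bracket with counter > 0 is marked matched
def pvFwd (st : Int × List Bool) (p : Int × Char) : Int × List Bool :=
  if p.2 = '(' then (st.1 + 1, st.2)
  else if p.2 = ')' ∧ st.1 > 0 then (st.1 - 1, PySem.List.pySetD st.2 p.1 true)
  else st

-- backward pass step: a closing bracket bumps the counter; an opening bracket with counter > 0 is marked matched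
def pvBwd (st : Int × List Bool) (p : Int × Char) : Int × List Bool :=
  if p.2 = ')' then (st.1 + 1, st.2)
  else if p.2 = '(' ∧ st.1 > 0 then (st.1 - 1, PySem.List.pySetD st.2 p.1 true)
  else st

def parse_rna_motifs_simple_alt (dot_bracket_string : String) : List (String × List Int) :=
  let cs := dot_bracket_string.toList
  let n : Int := PySem.Str.len dot_bracket_string
  let m1 := ((PySem.List.enumerate cs 0).foldl pvFwd (0, List.replicate cs.length false)).2
  let m2 := ((PySem.List.enumerate cs 0).reverse.foldl pvBwd (0, m1)).2
  [("stem", (PySem.List.pyRange 0 n 1).filter (fun i => PySem.List.pyGetD m2 i false)),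
   ("loop", (PySem.List.pyRange 0 n 1).filter (fun i => !PySem.List.pyGetD m2 i false))]

-- ===== PRECONDITION & SPEC =====
def Spec_parse_rna_motifs_simple (dot_bracket_string : String) (out : List (String × List Int)) : Prop := out = parse_rna_motifs_simple_alt dot_bracket_string
instance (dot_bracket_string : String) (out : List (String × List Int)) : Decidable (Spec_parse_rna_motifs_simple dot_bracket_string out) := by unfold Spec_parse_rna_motifs_simple; infer_instance

-- ===== CLAIM (what is proved, stated in full; the proofs are below) =====
def Claim_equal_parse_rna_motifs_simple : Prop := ∀ (dot_bracket_string : String), Dom_parse_rna_motifs_simple dot_bracket_string → Spec_parse_rna_motifs_simple dot_bracket_string (parse_rna_motifs_simple dot_bracket_string)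

-- ===== LEMMAS AND PROOFS =====

-- pvU cs c = value of the backward closing-bracket counter after scanning cs right-to-left starting from c
def pvU : List Char → Nat → Nat
  | [], c => c
  | ch :: rest, c => if ch = ')' then pvU rest c + 1 else if ch = '(' then pvU rest c - 1 else pvU rest c

-- pvFCB cs s h x : the closing bracket at absolute position x in cs (positions s, s+1, …) is matched,
-- where h is the incoming unmatched-open count
def pvFCB : List Char → Nat → Nat → Int → Bool
  | [], _, _, _ => false
  | ch :: rest, s, h, x =>
    if ch = '(' then pvFCB rest (s+1) (h+1) x
    else if ch = ')' then
      (if 0 < h then (decide (x = (s:Int)) || pvFCB rest (s+1) (h-1) x) else pvFCB rest (s+1) h x)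
    else pvFCB rest (s+1) h x

-- pvFOB cs s c x : the opening bracket at absolute position x in cs is matched, where c is the
-- unmatched-close count coming from the right of cs
def pvFOB : List Char → Nat → Nat → Int → Bool
  | [], _, _, _ => false
  | ch :: rest, s, c, x =>
    (decide (ch = '(') && decide (x = (s:Int)) && decide (0 < pvU rest c)) || pvFOB rest (s+1) c x

-- bounds: the flag predicates only fire inside [s, s + length)
theorem pvFCB_bounds (cs : List Char) : ∀ (s h : Nat) (x : Int),
    pvFCB cs s h x = true → (s : Int) ≤ x ∧ x < (s : Int) + cs.length := by
  induction cs with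
  | nil => intro s h x hx; simp [pvFCB] at hx
  | cons ch rest ih =>
    intro s h x hx
    simp only [pvFCB] at hx
    split_ifs at hx with h1 h2 h3
    · have := ih (s+1) (h+1) x hx; push_cast at this ⊢; simp; omega
    · rcases Bool.or_eq_true_iff.mp hx with hx | hx
      · have : x = (s : Int) := by simpa using hx
        simp [this]
      · have := ih (s+1) (h-1) x hx; push_cast at this ⊢; simp; omega
    · have := ih (s+1) h x hx; push_cast at this ⊢; simp; omega
    · have := ih (s+1) h x hx; push_cast at this ⊢; simp; omega

theorem pvFOB_bounds (cs : List Char) : ∀ (s c : Nat) (x : Int),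
    pvFOB cs s c x = true → (s : Int) ≤ x ∧ x < (s : Int) + cs.length := by
  induction cs with
  | nil => intro s c x hx; simp [pvFOB] at hx
  | cons ch rest ih =>
    intro s c x hx
    simp only [pvFOB, Bool.or_eq_true_iff, Bool.and_eq_true_iff, decide_eq_true_eq] at hx
    rcases hx with ⟨⟨-, hx⟩, -⟩ | hx
    · simp [hx]
    · have := ih (s+1) c x hx; push_cast at this ⊢; simp; omega

theorem pv_buildSet_nodup_gen (ps : List (Int × Int)) (s0 : PySem.Set Int) (h : s0.Nodup) :
    (ps.foldl (fun s p => PySem.Set.add (PySem.Set.add s p.1) p.2) s0).Nodup := by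
  induction ps generalizing s0 with
  | nil => simpa
  | cons q qs ih => exact ih _ (PySem.Set.nodup_add _ _ (PySem.Set.nodup_add _ _ h))

theorem pv_buildSet_nodup (ps : List (Int × Int)) : (pvBuildSet ps).Nodup :=
  pv_buildSet_nodup_gen ps PySem.Set.empty (by simp [PySem.Set.empty])

theorem pv_buildSet_append (ps : List (Int × Int)) (p : Int × Int) :
    pvBuildSet (ps ++ [p]) = PySem.Set.add (PySem.Set.add (pvBuildSet ps) p.1) p.2 := by
  simp [pvBuildSet, List.foldl_append]

-- getD after set, when both indices are in range
theorem pv_getD_set (xs : List Bool) (a k : Nat) (v : Bool) (hk : k < xs.length)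
    (ha : a < xs.length) :
    (xs.set a v).getD k false = if k = a then v else xs.getD k false := by
  rw [List.getD_eq_getElem _ _ (by simpa using hk), List.getD_eq_getElem _ _ hk,
    List.getElem_set]
  by_cases h : a = k
  · simp [h]
  · rw [if_neg h, if_neg (fun hh => h hh.symm)]

-- A-side invariant: after running A's matching fold over the suffix cs from stack stk and
-- pair list prs, an index belongs to the paired set iff it was already there, or it is
-- among the top (pvU cs 0) entries of stk (which get popped), or the flag predicates fire
-- A-side invariant: an index is in the paired set iff it was already there, it is among
-- the top pvU entries of the incoming stack (which get popped), or the flag predicates fire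
set_option maxHeartbeats 1000000 in
theorem pv_invA (cs : List Char) : ∀ (s : Nat) (stk : List Int) (prs : List (Int × Int)),
    (∀ e ∈ stk, 0 ≤ e ∧ e < (s : Int)) →
    ∀ x : Int,
      x ∈ pvBuildSet ((PySem.List.enumerate cs (s : Int)).foldl pvStepA (stk, prs)).2 ↔
        x ∈ pvBuildSet prs ∨ x ∈ stk.drop (stk.length - pvU cs 0)
          ∨ pvFCB cs s stk.length x = true ∨ pvFOB cs s 0 x = true := by
  induction cs with
  | nil =>
    intro s stk prs hstk x
    simp [PySem.List.enumerate_nil, pvU, pvFCB, pvFOB]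
  | cons ch rest ih =>
    intro s stk prs hstk x
    have hcast : ((s : Int) + 1) = ((s + 1 : Nat) : Int) := by push_cast; ring
    rw [PySem.List.enumerate_cons, List.foldl_cons, hcast]
    by_cases h1 : ch = '('
    · -- push s onto the stack
      subst h1
      have hstep : pvStepA (stk, prs) ((s : Int), '(') = (stk ++ [(s : Int)], prs) := by
        simp [pvStepA]
      rw [hstep]
      have hb' : ∀ e ∈ stk ++ [(s : Int)], 0 ≤ e ∧ e < ((s+1 : Nat) : Int) := by
        intro e he
        rcases List.mem_append.mp he with h | h
        · have := hstk e h; push_cast; omega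
        · simp at h; subst h; push_cast; omega
      rw [ih (s+1) (stk ++ [(s : Int)]) prs hb' x]
      have hdrop : x ∈ (stk ++ [(s : Int)]).drop ((stk ++ [(s:Int)]).length - pvU rest 0) ↔
          x ∈ stk.drop (stk.length - pvU ('(' :: rest) 0) ∨ (x = (s:Int) ∧ 0 < pvU rest 0) := by
        rcases Nat.eq_zero_or_pos (pvU rest 0) with hu | hu
        · simp [hu, pvU, List.drop_length]
        · have hle : (stk ++ [(s:Int)]).length - pvU rest 0 ≤ stk.length := by
            simp; omega
          have heq : (stk ++ [(s:Int)]).length - pvU rest 0 = stk.length - (pvU rest 0 - 1) := by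
            simp; omega
          have hU : pvU ('(' :: rest) 0 = pvU rest 0 - 1 := by simp [pvU]
          rw [List.drop_append_of_le_length hle, heq, hU]
          simp [List.mem_append, hu]
      rw [hdrop]
      have hFC : pvFCB ('(' :: rest) s stk.length x = pvFCB rest (s+1) (stk.length+1) x := by
        simp [pvFCB]
      have hFO : (pvFOB ('(' :: rest) s 0 x = true) ↔
          ((x = (s:Int) ∧ 0 < pvU rest 0) ∨ pvFOB rest (s+1) 0 x = true) := by
        simp [pvFOB]
      rw [hFC, hFO]
      simp only [List.length_append, List.length_cons, List.length_nil, Nat.zero_add]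
      tauto
    · by_cases h2 : ch = ')'
      · subst h2
        rcases hj : stk.getLast? with _ | j
        · -- empty stack: the ')' is unmatched, nothing changes
          have hne : stk = [] := List.getLast?_eq_none_iff.mp hj
          subst hne
          have hstep : pvStepA (([] : List Int), prs) ((s : Int), ')') = ([], prs) := by
            simp [pvStepA]
          rw [hstep, ih (s+1) [] prs (by simp) x]
          simp [pvFCB, pvFOB, pvU]
        · -- pop j, pair (j, s)
          have hne : stk ≠ [] := by intro h; rw [h] at hj; simp at hj
          have hjb := hstk j (List.mem_of_getLast? hj)
          have hmin : min (s : Int) j = j := min_eq_right (le_of_lt hjb.2)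
          have hmax : max (s : Int) j = (s : Int) := max_eq_left (le_of_lt hjb.2)
          have hstep : pvStepA (stk, prs) ((s : Int), ')')
              = (stk.dropLast, prs ++ [(j, (s : Int))]) := by
            simp [pvStepA, hj, hmin, hmax]
          rw [hstep, ih (s+1) stk.dropLast (prs ++ [(j, (s : Int))])
            (by intro e he
                have := hstk e (List.dropLast_subset _ he)
                push_cast; omega) x]
          have hjl : stk.getLast hne = j := by
            rw [List.getLast?_eq_getLast (h := hne)] at hj; exact Option.some.inj hj
          have hsplit : stk.dropLast ++ [j] = stk := by
            rw [← hjl]; exact List.dropLast_append_getLast hne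
          have hL : stk.length = stk.dropLast.length + 1 := by
            conv_lhs => rw [← hsplit]
            simp
          have hdrop : x ∈ stk.drop (stk.length - pvU (')' :: rest) 0) ↔
              x ∈ stk.dropLast.drop (stk.dropLast.length - pvU rest 0) ∨ x = j := by
            have heq : (stk.dropLast ++ [j]).length - pvU (')' :: rest) 0
                = stk.dropLast.length - pvU rest 0 := by
              simp [pvU]
            conv_lhs => rw [← hsplit]
            rw [heq, List.drop_append_of_le_length (by omega)]
            simp [List.mem_append]
          have hFC : (pvFCB (')' :: rest) s stk.length x = true) ↔
              (x = (s:Int) ∨ pvFCB rest (s+1) (stk.dropLast.length) x = true) := by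
            have hpos : 0 < stk.length := by omega
            rw [show stk.dropLast.length = stk.length - 1 by omega]
            simp [pvFCB, hpos]
          have hset : x ∈ pvBuildSet (prs ++ [(j, (s:Int))]) ↔
              x ∈ pvBuildSet prs ∨ x = j ∨ x = (s:Int) := by
            rw [pv_buildSet_append]
            simp [PySem.Set.mem_add]
            tauto
          have hFO : pvFOB (')' :: rest) s 0 x = pvFOB rest (s+1) 0 x := by
            simp [pvFOB]
          rw [hdrop, hFC, hset, hFO]
          tauto
      · -- any other character: nothing changes
        have hstep : pvStepA (stk, prs) ((s : Int), ch) = (stk, prs) := by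
          simp [pvStepA, h1, h2]
        rw [hstep, ih (s+1) stk prs
          (by intro e he; have := hstk e he; push_cast; omega) x]
        have hU : pvU (ch :: rest) 0 = pvU rest 0 := by simp [pvU, h1, h2]
        have hFC : pvFCB (ch :: rest) s stk.length x = pvFCB rest (s+1) stk.length x := by
          simp [pvFCB, h1, h2]
        have hFO : pvFOB (ch :: rest) s 0 x = pvFOB rest (s+1) 0 x := by
          simp [pvFOB, h1]
        rw [hU, hFC, hFO]

-- B forward pass: the flag array becomes the old one OR-ed with the pvFCB flags
theorem pv_invFwd (cs : List Char) : ∀ (s h : Nat) (m : List Bool),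
    s + cs.length ≤ m.length →
    (((PySem.List.enumerate cs (s : Int)).foldl pvFwd ((h : Int), m)).2.length = m.length ∧
     ∀ k : Nat, k < m.length →
      ((PySem.List.enumerate cs (s : Int)).foldl pvFwd ((h : Int), m)).2.getD k false
        = (m.getD k false || pvFCB cs s h (k : Int))) := by
  induction cs with
  | nil =>
    intro s h m hlen
    simp [PySem.List.enumerate_nil, pvFCB]
  | cons ch rest ih =>
    intro s h m hlen
    simp only [List.length_cons] at hlen
    have hs : s < m.length := by omega
    have hcast : ((s : Int) + 1) = ((s + 1 : Nat) : Int) := by push_cast; ring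
    rw [PySem.List.enumerate_cons, List.foldl_cons, hcast]
    by_cases h1 : ch = '('
    · have hstep : pvFwd ((h : Int), m) ((s : Int), ch) = (((h + 1 : Nat) : Int), m) := by
        simp [pvFwd, h1]
      rw [hstep]
      obtain ⟨hl, hg⟩ := ih (s+1) (h+1) m (by omega)
      exact ⟨hl, fun k hk => by rw [hg k hk]; simp [pvFCB, h1]⟩
    · by_cases h2 : ch = ')'
      · by_cases h3 : 0 < h
        · have hstep : pvFwd ((h : Int), m) ((s : Int), ch)
              = (((h - 1 : Nat) : Int), m.set s true) := by
            simp only [pvFwd, h1, if_false, h2, true_and]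
            rw [if_neg (by simp [h1]), if_pos (by exact_mod_cast h3)]
            simp [PySem.List.pySetD_natCast]
            push_cast [h3]; omega
          rw [hstep]
          obtain ⟨hl, hg⟩ := ih (s+1) (h-1) (m.set s true) (by simp; omega)
          refine ⟨by rw [hl]; simp, fun k hk => ?_⟩
          rw [hg k (by simpa using hk), pv_getD_set m s k true hk hs]
          simp only [pvFCB, h1, if_false, h2, if_true, if_pos h3]
          by_cases hks : k = s
          · simp [hks]
          · have : ¬ ((k : Int) = (s : Int)) := by exact_mod_cast hks
            simp [hks, this]
        · have hstep : pvFwd ((h : Int), m) ((s : Int), ch) = ((h : Int), m) := by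
            simp only [pvFwd]
            rw [if_neg (by simp [h1]), if_neg (by simp; intro _; omega)]
          rw [hstep]
          obtain ⟨hl, hg⟩ := ih (s+1) h m (by omega)
          refine ⟨hl, fun k hk => ?_⟩
          rw [hg k hk]
          simp [pvFCB, h1, h2, if_neg h3]
      · have hstep : pvFwd ((h : Int), m) ((s : Int), ch) = ((h : Int), m) := by
          simp [pvFwd, h1, h2]
        rw [hstep]
        obtain ⟨hl, hg⟩ := ih (s+1) h m (by omega)
        exact ⟨hl, fun k hk => by rw [hg k hk]; simp [pvFCB, h1, h2]⟩

-- B backward pass: counter ends at pvU, flags become the old ones OR-ed with pvFOB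
theorem pv_invBwd (cs : List Char) : ∀ (s c : Nat) (m : List Bool),
    s + cs.length ≤ m.length →
    (((PySem.List.enumerate cs (s : Int)).reverse.foldl pvBwd ((c : Int), m)).1 = (pvU cs c : Int) ∧
     ((PySem.List.enumerate cs (s : Int)).reverse.foldl pvBwd ((c : Int), m)).2.length = m.length ∧
     ∀ k : Nat, k < m.length →
      ((PySem.List.enumerate cs (s : Int)).reverse.foldl pvBwd ((c : Int), m)).2.getD k false
        = (m.getD k false || pvFOB cs s c (k : Int))) := by
  induction cs with
  | nil =>
    intro s c m hlen
    simp [PySem.List.enumerate_nil, pvU, pvFOB]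
  | cons ch rest ih =>
    intro s c m hlen
    simp only [List.length_cons] at hlen
    have hs : s < m.length := by omega
    have hcast : ((s : Int) + 1) = ((s + 1 : Nat) : Int) := by push_cast; ring
    rw [PySem.List.enumerate_cons, List.reverse_cons, List.foldl_append, hcast]
    obtain ⟨hc, hl, hg⟩ := ih (s+1) c m (by omega)
    set r := ((PySem.List.enumerate rest ((s+1 : Nat) : Int)).reverse.foldl pvBwd ((c : Int), m)) with hr
    have hrpair : r = ((pvU rest c : Int), r.2) := by
      rw [← hc]
    rw [List.foldl_cons, List.foldl_nil, hrpair]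
    by_cases h1 : ch = ')'
    · have hstep : pvBwd ((pvU rest c : Int), r.2) ((s : Int), ch)
          = (((pvU rest c + 1 : Nat) : Int), r.2) := by
        simp [pvBwd, h1]
      rw [hstep]
      refine ⟨by simp [pvU, h1], hl, fun k hk => ?_⟩
      rw [hg k hk]
      simp [pvFOB, h1]
    · by_cases h2 : ch = '('
      · by_cases h3 : 0 < pvU rest c
        · have hstep : pvBwd ((pvU rest c : Int), r.2) ((s : Int), ch)
              = (((pvU rest c - 1 : Nat) : Int), PySem.List.pySetD r.2 ((s : Int)) true) := by
            simp only [pvBwd]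
            rw [if_neg (by simp [h1]),
              if_pos (⟨h2, by exact_mod_cast h3⟩ : ch = '(' ∧ ((pvU rest c : Nat) : Int) > 0),
              Nat.cast_sub h3]
            norm_num
          rw [hstep]
          have hsetD : PySem.List.pySetD r.2 ((s : Int)) true = r.2.set s true := by
            simp [PySem.List.pySetD_natCast]
          refine ⟨by simp [pvU, h1, h2], by rw [hsetD]; simp [hl], fun k hk => ?_⟩
          rw [hsetD, pv_getD_set r.2 s k true (by rw [hl]; exact hk) (by rw [hl]; exact hs),
            hg k hk]
          by_cases hks : k = s
          · simp [pvFOB, hks, h2, h3]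
          · have hks' : ¬ ((k : Int) = (s : Int)) := by exact_mod_cast hks
            simp [pvFOB, hks, hks', h2]
        · have hstep : pvBwd ((pvU rest c : Int), r.2) ((s : Int), ch)
              = ((pvU rest c : Int), r.2) := by
            simp only [pvBwd]
            rw [if_neg (by simp [h1]), if_neg (by simp; intro _; omega)]
          rw [hstep]
          refine ⟨by simp [pvU, h1, h2]; omega, hl, fun k hk => ?_⟩
          rw [hg k hk]
          simp [pvFOB, h2, h3]
      · have hstep : pvBwd ((pvU rest c : Int), r.2) ((s : Int), ch)
            = ((pvU rest c : Int), r.2) := by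
          simp [pvBwd, h1, h2]
        rw [hstep]
        refine ⟨by simp [pvU, h1, h2], hl, fun k hk => ?_⟩
        rw [hg k hk]
        simp [pvFOB, h2]

-- sorted list of a nodup set bounded in [0, n) is the ordered filter of range(n)
theorem pv_sorted_eq_filter (S : PySem.Set Int) (hnd : S.Nodup) (n : Int)
    (hb : ∀ x ∈ S, 0 ≤ x ∧ x < n) :
    PySem.List.sorted S (fun x => x) false
      = (PySem.List.pyRange 0 n 1).filter (fun i => decide (i ∈ S)) := by
  apply PySem.List.sorted_eq_of_perm_of_pairwise_lt
  · apply (List.perm_ext_iff_of_nodup (List.Nodup.filter _ (PySem.List.nodup_pyRange_one 0 n)) hnd).mpr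
    intro x
    simp only [List.mem_filter, PySem.List.mem_pyRange_one, decide_eq_true_eq]
    exact ⟨fun h => h.2, fun h => ⟨⟨(hb x h).1, (hb x h).2⟩, h⟩⟩
  · exact List.Pairwise.filter _ (PySem.List.pairwise_lt_pyRange_one 0 n)

-- ===== VERDICT (by name: the statement is the Claim_ definition above) =====
theorem parse_rna_motifs_simple_spec : Claim_equal_parse_rna_motifs_simple := by
  unfold Claim_equal_parse_rna_motifs_simple Spec_parse_rna_motifs_simple
  intro str _
  by_cases hemp : str.toList = []
  · simp [parse_rna_motifs_simple, parse_rna_motifs_simple_alt, hemp, PySem.Str.len_eq,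
      PySem.List.pyRange_one_eq_nil]
  · obtain ⟨hl1, hg1⟩ := pv_invFwd str.toList 0 0 (List.replicate str.toList.length false)
      (by simp)
    simp only [Int.natCast_zero, List.length_replicate] at hl1 hg1
    obtain ⟨-, hl2, hg2⟩ := pv_invBwd str.toList 0 0
      (((PySem.List.enumerate str.toList (0:Int)).foldl pvFwd
        ((0:Int), List.replicate str.toList.length false)).2)
      (by rw [hl1]; simp)
    simp only [Int.natCast_zero] at hl2 hg2
    have hmemA := pv_invA str.toList 0 [] [] (by simp)
    simp only [Int.natCast_zero] at hmemA
    set S := pvBuildSet (((PySem.List.enumerate str.toList (0:Int)).foldl pvStepA ([], [])).2) with hS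
    set m2 := (((PySem.List.enumerate str.toList (0:Int)).reverse.foldl pvBwd
      ((0:Int), (((PySem.List.enumerate str.toList (0:Int)).foldl pvFwd
        ((0:Int), List.replicate str.toList.length false)).2))).2) with hm2
    have hm2get : ∀ k : Nat, k < str.toList.length →
        m2.getD k false = (pvFCB str.toList 0 0 (k : Int) || pvFOB str.toList 0 0 (k : Int)) := by
      intro k hk
      rw [hm2, hg2 k (by rw [hl1]; exact hk), hg1 k hk]
      simp [List.getD_replicate]
    have hmem : ∀ x : Int, x ∈ S ↔ (pvFCB str.toList 0 0 x || pvFOB str.toList 0 0 x) = true := by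
      intro x
      rw [hS, hmemA x]
      simp [pvBuildSet, PySem.Set.empty, List.drop_length]
    have hb : ∀ x ∈ S, 0 ≤ x ∧ x < (str.toList.length : Int) := by
      intro x hx
      rcases Bool.or_eq_true_iff.mp ((hmem x).mp hx) with h | h
      · have := pvFCB_bounds str.toList 0 0 x h; simpa using this
      · have := pvFOB_bounds str.toList 0 0 x h; simpa using this
    have hgetF : ∀ i ∈ PySem.List.pyRange 0 ((str.toList.length : Int)) 1,
        PySem.List.pyGetD m2 i false = decide (i ∈ S) := by
      intro i hi
      obtain ⟨h0, hilt⟩ := (PySem.List.mem_pyRange_one).mp hi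
      have hk : i.toNat < str.toList.length := by omega
      have h2 := hm2get i.toNat hk
      rw [Int.toNat_of_nonneg h0] at h2
      rw [PySem.List.pyGetD_of_nonneg _ false h0, h2]
      simp [hmem i]
    have hstem : PySem.List.sorted S (fun x => x) false
        = (PySem.List.pyRange 0 ((str.toList.length : Int)) 1).filter
            (fun i => PySem.List.pyGetD m2 i false) := by
      rw [pv_sorted_eq_filter _ (hS ▸ pv_buildSet_nodup _) _ hb]
      exact (List.filter_congr hgetF).symm
    have hTnd : (PySem.Set.diff (PySem.Set.ofList (PySem.List.pyRange 0 ((str.toList.length : Int)) 1)) S).Nodup :=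
      PySem.Set.nodup_diff _ _ (PySem.Set.nodup_ofList _)
    have hTb : ∀ x ∈ PySem.Set.diff (PySem.Set.ofList (PySem.List.pyRange 0 ((str.toList.length : Int)) 1)) S,
        0 ≤ x ∧ x < (str.toList.length : Int) := by
      intro x hx
      exact (PySem.List.mem_pyRange_one).mp
        ((PySem.Set.mem_ofList _ _).mp ((PySem.Set.mem_diff _ _ _).mp hx).1)
    have hloop : PySem.List.sorted
        (PySem.Set.diff (PySem.Set.ofList (PySem.List.pyRange 0 ((str.toList.length : Int)) 1)) S) (fun x => x) false
        = (PySem.List.pyRange 0 ((str.toList.length : Int)) 1).filter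
            (fun i => !(PySem.List.pyGetD m2 i false)) := by
      rw [pv_sorted_eq_filter _ hTnd _ hTb]
      apply List.filter_congr
      intro i hi
      rw [hgetF i hi]
      by_cases hSi : i ∈ S
      · simp [hSi, PySem.Set.mem_diff, PySem.Set.mem_ofList, hi]
      · have hb2 := (PySem.List.mem_pyRange_one).mp hi
        simp [hSi, PySem.Set.mem_diff, PySem.Set.mem_ofList, hi]
        exact ⟨hb2.1, by simpa using hb2.2⟩
    simp only [parse_rna_motifs_simple, parse_rna_motifs_simple_alt, if_neg hemp, PySem.Str.len_eq]
    rw [← hS, ← hm2, hstem, hloop]
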